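-- pv_equiv track=rewrite | github.com/happy124210/Algorithm | 백준/Silver/2164. 카드2/카드2.py | card2
-- ===== SOURCE A (Python) =====
-- import queue
--
-- def card2(N):
--     A = queue.Queue()
--     for i in range(1,N+1):
--         A.put(i)
--
--     while A.qsize() != 1:
--         A.get()
--         temp = A.get()
--         A.put(temp)
--
--     return A.get()
-- ===== SOURCE B (Python) =====
-- def card2(N):
--     # largest power of two <= N; answer is N itself for powers of two,
--     # else twice the remainder past that power (O(1) closed form).
--     p = 1 << (N.bit_length() - 1)
--     return N if N == p else 2 * (N - p)
-- ===== Notes on version B (the rewrite author's own statement) =====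
-- stated objective: faster
-- what changed: Replaces the O(N) queue simulation with the O(1) Josephus closed form: N when N is a power of two, otherwise 2*(N - 2^floor(log2 N)).
import Mathlib
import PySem

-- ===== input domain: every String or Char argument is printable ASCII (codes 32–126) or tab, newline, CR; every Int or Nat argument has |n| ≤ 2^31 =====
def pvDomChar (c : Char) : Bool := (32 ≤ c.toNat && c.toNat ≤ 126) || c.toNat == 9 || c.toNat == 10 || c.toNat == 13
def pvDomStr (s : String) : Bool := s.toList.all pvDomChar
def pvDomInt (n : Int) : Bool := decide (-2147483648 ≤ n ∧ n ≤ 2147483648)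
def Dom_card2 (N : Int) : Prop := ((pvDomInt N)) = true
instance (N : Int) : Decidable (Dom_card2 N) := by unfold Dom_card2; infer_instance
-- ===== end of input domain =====

-- B replaces A's O(N) queue simulation by the O(1) Josephus closed form.

-- ===== PORT A =====
-- the while loop: get one card (discard), get the next and put it at the back,
-- until a single card remains; [] is Python's blocking A.get() (excluded by Pre_)
def card2Loop (q : List Int) : Int :=
  match q with
  | [] => 0
  | [x] => x
  | _ :: b :: rest => card2Loop (rest ++ [b])
termination_by q.length
decreasing_by simp

def card2 (N : Int) : Int :=
  card2Loop (PySem.List.pyRange 1 (N + 1) 1)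

-- ===== PORT B =====
-- n.bit_length() on the absolute value, as Python computes it
def bitLen (n : Nat) : Nat :=
  match n with
  | 0 => 0
  | m + 1 => bitLen ((m + 1) / 2) + 1
termination_by n
decreasing_by exact Nat.div_lt_self (Nat.succ_pos m) (by norm_num)

-- p = 1 << (N.bit_length() - 1); Nat subtraction: for N = 0 Python raises, outside Pre_
def card2_alt (N : Int) : Int :=
  let p : Int := 2 ^ (bitLen N.natAbs - 1)
  if N = p then N else 2 * (N - p)

-- ===== PRECONDITION & SPEC =====
-- A's while loop blocks forever (Queue.get) when N < 1, so A returns only for 1 ≤ N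
def Pre_card2 (N : Int) : Prop := 1 ≤ N
instance (N : Int) : Decidable (Pre_card2 N) := by unfold Pre_card2; infer_instance
def pvWitness_card2 : Int := (5)

def Spec_card2 (N : Int) (out : Int) : Prop := out = card2_alt N
instance (N : Int) (out : Int) : Decidable (Spec_card2 N out) := by unfold Spec_card2; infer_instance

-- ===== CLAIM (what is proved, stated in full; the proofs are below) =====
def Claim_equal_card2 : Prop := ∀ (N : Int), Dom_card2 N → Pre_card2 N → Spec_card2 N (card2 N)

-- ===== LEMMAS AND PROOFS =====

-- index of the surviving card in a queue of length n (0-based)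
def gIdx : Nat → Nat
  | 0 => 0
  | 1 => 0
  | (m + 2) => if gIdx (m + 1) = m then 1 else gIdx (m + 1) + 2

theorem gIdx_le (n : Nat) : gIdx (n + 1) ≤ n := by
  induction n with
  | zero => simp [gIdx]
  | succ m ih =>
    show gIdx (m + 2) ≤ m + 1
    rw [gIdx]
    split
    · omega
    · omega

theorem gIdx_lt (n : Nat) (h : 1 ≤ n) : gIdx n < n := by
  match n, h with
  | (m + 1), _ => have := gIdx_le m; omega

theorem card2Loop_getD : ∀ (n : Nat) (q : List Int), q.length = n → q ≠ [] →
    card2Loop q = (q[gIdx q.length]?).getD 0 := by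
  intro n
  induction n using Nat.strong_induction_on with
  | _ n ih =>
    intro q hlen hne
    match q with
    | [] => exact absurd rfl hne
    | [x] => rw [card2Loop.eq_def]; simp [gIdx]
    | a :: b :: rest =>
      have hlen2 : (rest ++ [b]).length = rest.length + 1 := by simp
      have hrec := ih (rest.length + 1) (by simp at hlen; omega) (rest ++ [b]) hlen2 (by simp)
      have hstep : card2Loop (a :: b :: rest) = card2Loop (rest ++ [b]) := by
        rw [card2Loop.eq_def]
      rw [hstep, hrec, hlen2]
      have hq : (a :: b :: rest).length = rest.length + 2 := by simp
      rw [hq]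
      rw [show gIdx (rest.length + 2) = if gIdx (rest.length + 1) = rest.length then 1
            else gIdx (rest.length + 1) + 2 from rfl]
      by_cases hc : gIdx (rest.length + 1) = rest.length
      · simp [hc]
      · have hle : gIdx (rest.length + 1) ≤ rest.length := gIdx_le rest.length
        have hlt : gIdx (rest.length + 1) < rest.length := by omega
        simp [hc, List.getElem?_append_left hlt]

theorem bitLen_eq : ∀ n : Nat, 1 ≤ n → bitLen n = Nat.log 2 n + 1 := by
  intro n
  induction n using Nat.strong_induction_on with
  | _ n ih =>
    intro h1
    match n, h1 with
    | 1, _ => simp [bitLen]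
    | (m + 2), _ =>
      rw [bitLen]
      have hdiv1 : 1 ≤ (m + 2) / 2 := by omega
      have hdivlt : (m + 2) / 2 < m + 2 := by omega
      rw [ih _ hdivlt hdiv1]
      have hlog : Nat.log 2 ((m + 2) / 2) = Nat.log 2 (m + 2) - 1 := Nat.log_div_base 2 (m + 2)
      have hpos : 0 < Nat.log 2 (m + 2) := Nat.log_pos (by norm_num) (by omega)
      omega

theorem gIdx_eq : ∀ n : Nat, 1 ≤ n →
    gIdx n + 1 = (if 2 ^ Nat.log 2 n = n then n else 2 * (n - 2 ^ Nat.log 2 n)) := by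
  intro n
  induction n with
  | zero => omega
  | succ m ih =>
    intro _
    match m, ih with
    | 0, _ => simp [gIdx]
    | (k + 1), ih =>
      have ihk := ih (by omega)
      set n := k + 1 with hn
      have hnpos : 1 ≤ n := by omega
      have hple : 2 ^ Nat.log 2 n ≤ n := Nat.pow_log_le_self 2 (by omega)
      have hlt : n < 2 ^ (Nat.log 2 n + 1) := Nat.lt_pow_succ_log_self (by norm_num) n
      rw [show gIdx (n + 1) = if gIdx n = n - 1 then 1 else gIdx n + 2 from by
            rw [hn]; rfl]
      rcases Nat.lt_or_ge (n + 1) (2 ^ (Nat.log 2 n + 1)) with hcase | hcase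
      · -- n+1 stays below the next power of two: same log
        have hlogs : Nat.log 2 (n + 1) = Nat.log 2 n :=
          Nat.log_eq_of_pow_le_of_lt_pow (by omega) hcase
        rw [hlogs]
        have hne : ¬ (2 ^ Nat.log 2 n = n + 1) := by omega
        rw [if_neg hne]
        by_cases hp : 2 ^ Nat.log 2 n = n
        · rw [if_pos hp] at ihk
          have : gIdx n = n - 1 := by omega
          rw [if_pos this]; omega
        · rw [if_neg hp] at ihk
          have hplt : 2 ^ Nat.log 2 n < n := by omega
          have h2 : 2 ^ (Nat.log 2 n + 1) = 2 * 2 ^ Nat.log 2 n := by ring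
          have : ¬ (gIdx n = n - 1) := by omega
          rw [if_neg this]; omega
      · -- n+1 = 2^(log n + 1): a power of two
        have heq : n + 1 = 2 ^ (Nat.log 2 n + 1) := by omega
        have hlogs : Nat.log 2 (n + 1) = Nat.log 2 n + 1 := by
          rw [heq, Nat.log_pow (by norm_num)]
        rw [hlogs, if_pos heq.symm]
        by_cases hp : 2 ^ Nat.log 2 n = n
        · rw [if_pos hp] at ihk
          have h2 : 2 ^ (Nat.log 2 n + 1) = 2 * 2 ^ Nat.log 2 n := by ring
          have hn1 : n = 1 := by omega
          rw [if_pos (by omega)]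
          omega
        · rw [if_neg hp] at ihk
          have hplt : 2 ^ Nat.log 2 n < n := by omega
          have h2 : 2 ^ (Nat.log 2 n + 1) = 2 * 2 ^ Nat.log 2 n := by ring
          have : ¬ (gIdx n = n - 1) := by omega
          rw [if_neg this]; omega

-- ===== VERDICT (by name: the statement is the Claim_ definition above) =====
theorem card2_spec : Claim_equal_card2 := by
  unfold Claim_equal_card2
  intro N _ hpre
  unfold Spec_card2
  unfold Pre_card2 at hpre
  obtain ⟨n, hN⟩ : ∃ n : Nat, N = (n : Int) := ⟨N.toNat, by omega⟩
  subst hN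
  have hn1 : 1 ≤ n := by exact_mod_cast hpre
  have hglt : gIdx n < n := gIdx_lt n hn1
  -- evaluate A's port
  have hrange : PySem.List.pyRange 1 ((n : Int) + 1) 1 =
      (List.range n).map (fun k : Nat => (1 : Int) + (k : Int)) := by
    rw [PySem.List.pyRange_one, show ((n : Int) + 1 - 1).toNat = n from by omega]
  have helem : ((List.range n).map (fun k : Nat => (1 : Int) + (k : Int)))[gIdx n]? =
      some (1 + (gIdx n : Int)) := by
    rw [List.getElem?_map, List.getElem?_range hglt]
    rfl
  have hA : card2 (n : Int) = ((gIdx n : Int) + 1) := by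
    unfold card2
    rw [hrange]
    rw [card2Loop_getD ((List.range n).map (fun k : Nat => (1 : Int) + (k : Int))).length _ rfl
        (by apply List.ne_nil_of_length_pos; simp; omega)]
    simp only [List.length_map, List.length_range, helem, Option.getD_some]
    ring
  -- evaluate B's port
  have hnatAbs : ((n : Int)).natAbs = n := Int.natAbs_natCast n
  have hbl : bitLen ((n : Int)).natAbs - 1 = Nat.log 2 n := by
    rw [hnatAbs, bitLen_eq n hn1]
    omega
  have hple : 2 ^ Nat.log 2 n ≤ n := Nat.pow_log_le_self 2 (by omega)
  have hg := gIdx_eq n hn1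
  rw [hA]
  unfold card2_alt
  rw [hbl]
  by_cases hp : 2 ^ Nat.log 2 n = n
  · rw [if_pos hp] at hg
    rw [if_pos (by exact_mod_cast hp.symm)]
    omega
  · rw [if_neg hp] at hg
    rw [if_neg (by intro h; exact hp (by exact_mod_cast h.symm))]
    have hcast : ((2 : Int) ^ Nat.log 2 n) = ((2 ^ Nat.log 2 n : Nat) : Int) := by
      push_cast; ring
    rw [hcast]
    omega
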